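-- pv_equiv track=rewrite | github.com/cefn/blueshrimp | python/code7/code7.py | encode7
-- ===== SOURCE A (Python) =====
-- def encode7(srcbytes):
--
-- 	dstbytes = []
-- 	overflowbyte = 0
-- 	overflowpos = 0
-- 	dstpos = 0
--
-- 	for srcpos, srcbyte in enumerate(srcbytes):
-- 		srcbyte = srcbyte
--
-- 		overflowbyte |= (srcbyte & 0x80) >> (overflowpos + 1)
-- 		overflowpos += 1
--
-- 		dstbytes.append(srcbyte & ~0x80)
-- 		dstpos += 1
--
-- 		if(overflowpos == 7 or srcpos == len(srcbytes) - 1):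
-- 			dstbytes.append(overflowbyte);
-- 			dstpos += 1
-- 			overflowbyte = 0
-- 			overflowpos = 0
--
-- 	return dstbytes
-- ===== SOURCE B (Python) =====
-- def encode7(srcbytes):
--     out = []
--     for i in range(0, len(srcbytes), 7):
--         chunk = srcbytes[i:i + 7]
--         overflow = 0
--         for j, b in enumerate(chunk):
--             out.append(b & ~0x80)
--             overflow |= (b & 0x80) >> (j + 1)
--         out.append(overflow)
--     return out
-- ===== Notes on version B (the rewrite author's own statement) =====
-- stated objective: simpler
-- what changed: Replaces A's single streaming loop with overflowbyte/overflowpos/dstpos state and a flush condition (pos==7 or last element) by a plain chunks-of-7 decomposition: slice the input into 7-byte chunks, strip each byte's high bit, and append one overflow byte per chunk.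
import Mathlib
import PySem

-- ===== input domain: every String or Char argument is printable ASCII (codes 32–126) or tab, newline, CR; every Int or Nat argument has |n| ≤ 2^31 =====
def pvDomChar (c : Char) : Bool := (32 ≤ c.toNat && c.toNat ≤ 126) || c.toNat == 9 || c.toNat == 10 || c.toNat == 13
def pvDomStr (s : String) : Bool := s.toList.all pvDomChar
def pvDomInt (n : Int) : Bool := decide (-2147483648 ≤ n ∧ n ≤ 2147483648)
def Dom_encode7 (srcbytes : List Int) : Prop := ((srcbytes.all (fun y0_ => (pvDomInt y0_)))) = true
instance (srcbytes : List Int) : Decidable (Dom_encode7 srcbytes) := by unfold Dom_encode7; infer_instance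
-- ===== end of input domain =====

-- B replaces A's streaming overflow-position state machine by a plain chunks-of-7 decomposition
-- (slice, strip, one overflow byte per chunk): a simpler decomposition, same cost.


-- ===== PORT A =====
-- A's for-loop over enumerate(srcbytes) as structural recursion over the same state
-- (dstbytes, overflowbyte, overflowpos); overflowpos is 0..6 in Python, kept as Nat so the
-- shift amount (overflowpos + 1) is the Nat `>>>` requires; `&`,`|`,`~` are Int.land/lor/not.
def encode7Loop (n : Int) (pairs : List (Int × Int)) (dstbytes : List Int)
    (overflowbyte : Int) (overflowpos : Nat) : List Int :=
  match pairs with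
  | [] => dstbytes
  | (srcpos, srcbyte) :: rest =>
    let overflowbyte := Int.lor overflowbyte ((Int.land srcbyte 0x80) >>> ((overflowpos : Int) + 1))
    let overflowpos := overflowpos + 1
    let dstbytes := dstbytes ++ [Int.land srcbyte (Int.not 0x80)]
    if overflowpos = 7 ∨ srcpos = n - 1 then
      encode7Loop n rest (dstbytes ++ [overflowbyte]) 0 0
    else
      encode7Loop n rest dstbytes overflowbyte overflowpos

def encode7 (srcbytes : List Int) : List Int :=
  encode7Loop srcbytes.length (PySem.List.enumerate srcbytes) [] 0 0

-- ===== PORT B =====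
-- inner loop of Source B: fold over enumerate(chunk) accumulating (out, overflow)
def encode7AltChunk (chunk : List Int) : List Int × Int :=
  (PySem.List.enumerate chunk).foldl
    (fun st p =>
      (st.1 ++ [Int.land p.2 (Int.not 0x80)],
       Int.lor st.2 ((Int.land p.2 0x80) >>> (p.1 + 1))))
    ([], 0)

-- outer loop of Source B: range(0, len, 7) with slicing = recursion on take 7 / drop 7
def encode7_alt (srcbytes : List Int) : List Int :=
  match srcbytes with
  | [] => []
  | b :: t =>
    let (outc, overflow) := encode7AltChunk ((b :: t).take 7)
    outc ++ [overflow] ++ encode7_alt ((b :: t).drop 7)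
termination_by srcbytes.length
decreasing_by simp

-- ===== PRECONDITION & SPEC =====
def Spec_encode7 (srcbytes : List Int) (out : List Int) : Prop := out = encode7_alt srcbytes
instance (srcbytes : List Int) (out : List Int) : Decidable (Spec_encode7 srcbytes out) := by unfold Spec_encode7; infer_instance

-- ===== CLAIM (what is proved, stated in full; the proofs are below) =====
def Claim_equal_encode7 : Prop := ∀ (srcbytes : List Int), Dom_encode7 srcbytes → Spec_encode7 srcbytes (encode7 srcbytes)

-- ===== LEMMAS AND PROOFS =====

-- proof-side spec pieces: the stripped data bytes, and the overflow byte accumulated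
-- from position op with initial value ob
def pvStrip (xs : List Int) : List Int := xs.map (fun b => Int.land b (Int.not 0x80))

def pvOv (op : Nat) (ob : Int) : List Int → Int
  | [] => ob
  | b :: t => pvOv (op + 1) (Int.lor ob ((Int.land b 0x80) >>> ((op : Int) + 1))) t

theorem encode7AltChunk_aux (c : List Int) : ∀ (i : Int) (j : Nat) (out : List Int) (ob : Int),
    i = (j : Int) →
    (PySem.List.enumerate c i).foldl
      (fun st p =>
        (st.1 ++ [Int.land p.2 (Int.not 0x80)],
         Int.lor st.2 ((Int.land p.2 0x80) >>> (p.1 + 1))))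
      (out, ob) = (out ++ pvStrip c, pvOv j ob c) := by
  induction c with
  | nil => intro i j out ob _; simp [PySem.List.enumerate_nil, pvStrip, pvOv]
  | cons b t ih =>
    intro i j out ob hij
    rw [PySem.List.enumerate_cons, List.foldl_cons]
    subst hij
    rw [ih ((j : Int) + 1) (j + 1) _ _ (by push_cast; ring)]
    simp only [pvStrip, pvOv, List.map_cons]
    rw [show ((j : Int) + 1) = (((j + 1 : Nat)) : Int) by push_cast; ring]
    simp

theorem encode7AltChunk_eq (c : List Int) :
    encode7AltChunk c = (pvStrip c, pvOv 0 0 c) := by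
  have := encode7AltChunk_aux c 0 0 [] 0 rfl
  simpa [encode7AltChunk] using this

theorem encode7_alt_nil : encode7_alt [] = [] := by
  rw [encode7_alt.eq_def]

theorem encode7_alt_cons (b : Int) (t : List Int) :
    encode7_alt (b :: t) =
      pvStrip ((b :: t).take 7) ++ [pvOv 0 0 ((b :: t).take 7)] ++ encode7_alt ((b :: t).drop 7) := by
  rw [encode7_alt.eq_def]
  simp [encode7AltChunk_eq]

-- one (possibly partial) chunk of A's loop, started mid-chunk at position op < 7
theorem encode7Loop_chunk (xs : List Int) : ∀ (i : Int) (dst : List Int) (ob : Int) (op : Nat),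
    op < 7 →
    encode7Loop (i + xs.length) (PySem.List.enumerate xs i) dst ob op =
      if xs.length + op < 7 then
        dst ++ pvStrip xs ++ (if xs.isEmpty then [] else [pvOv op ob xs])
      else
        encode7Loop (i + xs.length) (PySem.List.enumerate (xs.drop (7 - op)) (i + ((7 - op : Nat) : Int)))
          (dst ++ pvStrip (xs.take (7 - op)) ++ [pvOv op ob (xs.take (7 - op))]) 0 0 := by
  induction xs with
  | nil =>
    intro i dst ob op hop
    simp only [PySem.List.enumerate_nil, List.length_nil, encode7Loop]
    rw [if_pos (by omega : 0 + op < 7)]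
    simp [pvStrip]
  | cons b t ih =>
    intro i dst ob op hop
    rw [PySem.List.enumerate_cons, encode7Loop]
    by_cases h7 : op + 1 = 7
    · -- chunk boundary reached at this element
      have hcond : (op + 1 = 7 ∨ i = i + (((b :: t).length : Int)) - 1) := Or.inl h7
      rw [if_pos hcond]
      have hnot : ¬ ((b :: t).length + op < 7) := by
        simp only [List.length_cons]; omega
      rw [if_neg hnot]
      have hm : 7 - op = 1 := by omega
      simp only [hm, List.take_succ_cons, List.take_zero, List.drop_succ_cons, List.drop_zero]
      simp [pvStrip, pvOv, List.append_assoc]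
    · by_cases hlast : t = []
      · -- last element of the input, chunk not full: overflow flushed by the srcpos test
        subst hlast
        have hcond : (op + 1 = 7 ∨ i = i + ((([b] : List Int).length : Int)) - 1) := by
          right; simp
        rw [if_pos hcond]
        simp only [PySem.List.enumerate_nil, encode7Loop]
        have hsm : ([b] : List Int).length + op < 7 := by
          simp only [List.length_singleton]; omega
        rw [if_pos hsm]
        simp [pvStrip, pvOv, List.append_assoc]
      · -- mid-chunk, more elements follow
        have hcond : ¬ (op + 1 = 7 ∨ i = i + (((b :: t).length : Int)) - 1) := by
          rintro (h | h)
          · exact h7 h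
          · have ht : t.length = 0 := by
              simp only [List.length_cons] at h; push_cast at h; omega
            exact hlast (List.length_eq_zero_iff.mp ht)
        rw [if_neg hcond]
        have := ih (i + 1) (dst ++ [Int.land b (Int.not 0x80)])
          (Int.lor ob ((Int.land b 0x80) >>> ((op : Int) + 1))) (op + 1) (by omega)
        rw [show (i + 1) + ((t.length : Int)) = i + (((b :: t).length : Int)) by simp; ring] at this
        rw [this]
        by_cases hsmall : t.length + (op + 1) < 7
        · have hbig : (b :: t).length + op < 7 := by
            simp only [List.length_cons]; omega
          rw [if_pos hsmall, if_pos hbig]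
          simp [pvStrip, pvOv, List.append_assoc, hlast]
        · have hbig : ¬ ((b :: t).length + op < 7) := by
            simp only [List.length_cons]; omega
          rw [if_neg hsmall, if_neg hbig]
          have hm : 7 - op = (7 - (op + 1)) + 1 := by omega
          rw [hm]
          simp only [List.take_succ_cons, List.drop_succ_cons]
          rw [show i + 1 + (((7 - (op + 1) : Nat)) : Int) = i + ((((7 - (op + 1)) + 1 : Nat)) : Int) by
            push_cast; ring]
          simp [pvStrip, pvOv, List.append_assoc]

theorem encode7Loop_eq_alt (N : Nat) : ∀ (xs : List Int), xs.length ≤ N →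
    ∀ (i : Int) (dst : List Int),
    encode7Loop (i + xs.length) (PySem.List.enumerate xs i) dst 0 0 = dst ++ encode7_alt xs := by
  induction N with
  | zero =>
    intro xs hxs i dst
    have : xs = [] := List.length_eq_zero_iff.mp (by omega)
    subst this
    simp [PySem.List.enumerate_nil, encode7Loop, encode7_alt_nil]
  | succ N ih =>
    intro xs hxs i dst
    rcases hnil : xs with _ | ⟨b, t⟩
    · simp [PySem.List.enumerate_nil, encode7Loop, encode7_alt_nil]
    rw [← hnil]
    have halt : encode7_alt xs =
        pvStrip (xs.take 7) ++ [pvOv 0 0 (xs.take 7)] ++ encode7_alt (xs.drop 7) := by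
      rw [hnil]; exact encode7_alt_cons b t
    rw [encode7Loop_chunk xs i dst 0 0 (by omega)]
    by_cases hsmall : xs.length + 0 < 7
    · rw [if_pos hsmall]
      have h1 : xs.take 7 = xs := List.take_of_length_le (by omega)
      have h2 : xs.drop 7 = [] := List.drop_eq_nil_of_le (by omega)
      rw [halt, h1, h2, encode7_alt_nil]
      have hne : xs.isEmpty = false := by rw [hnil]; simp
      simp [hne, List.append_assoc]
    · rw [if_neg hsmall]
      have hlen : (xs.drop 7).length ≤ N := by
        rw [hnil] at hxs ⊢; simp at hxs ⊢; omega
      have hrec := ih (xs.drop 7) hlen (i + ((7 : Nat) : Int))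
        (dst ++ pvStrip (xs.take 7) ++ [pvOv 0 0 (xs.take 7)])
      rw [show (i + (((7:Nat)) : Int)) + (((xs.drop 7).length : Int)) = i + ((xs.length : Int)) by
        simp at hsmall ⊢; omega] at hrec
      rw [hrec, halt]
      simp [List.append_assoc]

-- ===== VERDICT (by name: the statement is the Claim_ definition above) =====
theorem encode7_spec : Claim_equal_encode7 := by
  intro srcbytes _
  unfold Spec_encode7 encode7
  have := encode7Loop_eq_alt srcbytes.length srcbytes le_rfl 0 []
  simpa using this
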